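-- pv_equiv track=rewrite | github.com/JeongB-L/problemSolving | src/functionPractices.py | summer_69
-- ===== SOURCE A (Python) =====
-- def summer_69(arr):
--     result = 0
--     flag = True
--     for a in arr:
--         if a == 6:
--             flag = False
--         if flag == True:
--             result = result + a
--         if flag == False and a == 9:
--             flag = True
--     return result
-- ===== SOURCE B (Python) =====
-- def summer_69(arr):
--     total = 0
--     i = 0
--     n = len(arr)
--     while i < n:
--         if arr[i] == 6:
--             j = i + 1
--             while j < n and arr[j] != 9:
--                 j += 1
--             i = j + 1
--         else:
--             total += arr[i]
--             i += 1
--     return total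
-- ===== Notes on version B (the rewrite author's own statement) =====
-- stated objective: alternative
-- what changed: Replaces the per-element boolean flag state machine by an explicit index walk that, on seeing a 6, runs an inner loop to skip forward past the next 9 (or to the end), so no flag state is carried.
import Mathlib
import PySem

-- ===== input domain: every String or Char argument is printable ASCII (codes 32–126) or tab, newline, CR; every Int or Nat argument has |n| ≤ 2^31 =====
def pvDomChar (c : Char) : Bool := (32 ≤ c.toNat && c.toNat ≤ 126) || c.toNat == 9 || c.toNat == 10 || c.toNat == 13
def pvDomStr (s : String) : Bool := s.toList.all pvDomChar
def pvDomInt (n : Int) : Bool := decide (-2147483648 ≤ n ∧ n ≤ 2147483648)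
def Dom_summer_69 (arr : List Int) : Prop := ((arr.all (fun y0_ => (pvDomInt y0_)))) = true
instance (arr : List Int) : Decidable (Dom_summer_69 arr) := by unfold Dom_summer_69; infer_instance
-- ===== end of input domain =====

-- B replaces A's boolean-flag single pass by an index walk that skips past the next 9 on seeing a 6 (alternative decomposition, same cost).


-- ===== PORT A =====
-- for a in arr, carrying (result, flag)
def summer_69 (arr : List Int) : Int :=
  (arr.foldl (fun (st : Int × Bool) (a : Int) =>
      let flag1 : Bool := if a = 6 then false else st.2
      let r1 : Int := if flag1 = true then st.1 + a else st.1
      let flag2 : Bool := if flag1 = false ∧ a = 9 then true else flag1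
      (r1, flag2)) ((0 : Int), true)).1

-- ===== PORT B =====
-- inner while loop: advance j until arr[j] == 9 or j = len(arr); returns the final j.
-- The Nat fuel argument only makes the recursion structural; with fuel ≥ arr.length - j it never runs out.
def bInnerAux (arr : List Int) : Nat → Nat → Nat
  | 0, j => j
  | k + 1, j => if j < arr.length ∧ arr.getD j 0 ≠ 9 then bInnerAux arr k (j + 1) else j

def bInner (arr : List Int) (j : Nat) : Nat := bInnerAux arr (arr.length - j) j

-- outer while loop with index i and accumulator total; fuel as above
def bOuterAux (arr : List Int) : Nat → Nat → Int → Int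
  | 0, _, total => total
  | k + 1, i, total =>
    if i < arr.length then
      if arr.getD i 0 = 6 then bOuterAux arr k (bInner arr (i + 1) + 1) total
      else bOuterAux arr k (i + 1) (total + arr.getD i 0)
    else total

def summer_69_alt (arr : List Int) : Int := bOuterAux arr arr.length 0 0

-- ===== PRECONDITION & SPEC =====
def Spec_summer_69 (arr : List Int) (out : Int) : Prop := out = summer_69_alt arr
instance (arr : List Int) (out : Int) : Decidable (Spec_summer_69 arr out) := by unfold Spec_summer_69; infer_instance

-- ===== CLAIM (what is proved, stated in full; the proofs are below) =====
def Claim_equal_summer_69 : Prop := ∀ (arr : List Int), Dom_summer_69 arr → Spec_summer_69 arr (summer_69 arr)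

-- ===== LEMMAS AND PROOFS =====

-- drop everything up to and including the first 9
def skipPast9 : List Int → List Int
  | [] => []
  | x :: xs => if x = 9 then xs else skipPast9 xs

theorem skipPast9_length (xs : List Int) : (skipPast9 xs).length ≤ xs.length := by
  induction xs with
  | nil => simp [skipPast9]
  | cons x xs ih =>
    simp only [skipPast9]
    split
    · simp
    · simp; omega

-- abstract recursive form B computes: skip between 6 and the next 9
def altGo : List Int → Int
  | [] => 0
  | a :: xs => if a = 6 then altGo (skipPast9 xs) else a + altGo xs
termination_by xs => xs.length
decreasing_by
  · have := skipPast9_length xs; simp; omega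
  · simp

theorem drop_getD_cons (arr : List Int) (j : Nat) (h : j < arr.length) :
    List.drop j arr = arr.getD j 0 :: List.drop (j + 1) arr := by
  rw [List.getD_eq_getElem arr 0 h]
  exact (List.getElem_cons_drop h).symm

theorem bInnerAux_ge (arr : List Int) : ∀ (k j : Nat), j ≤ bInnerAux arr k j := by
  intro k
  induction k with
  | zero => intro j; simp [bInnerAux]
  | succ k ih =>
    intro j
    simp only [bInnerAux]
    split
    · exact le_trans (Nat.le_succ j) (ih (j + 1))
    · exact le_refl j

theorem bInnerAux_drop (arr : List Int) :
    ∀ (k j : Nat), arr.length - j ≤ k →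
      List.drop (bInnerAux arr k j + 1) arr = skipPast9 (List.drop j arr) := by
  intro k
  induction k with
  | zero =>
    intro j hk
    have hj : arr.length ≤ j := by omega
    rw [List.drop_eq_nil_of_le hj, List.drop_eq_nil_of_le (by simp [bInnerAux]; omega)]
    simp [skipPast9]
  | succ k ih =>
    intro j hk
    simp only [bInnerAux]
    split
    · rename_i h
      rw [drop_getD_cons arr j h.1, skipPast9, if_neg h.2]
      exact ih (j + 1) (by omega)
    · rename_i h
      rw [Decidable.not_and_iff_or_not] at h
      rcases h with h | h
      · have hj : arr.length ≤ j := by omega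
        rw [List.drop_eq_nil_of_le hj, List.drop_eq_nil_of_le (by omega)]
        simp [skipPast9]
      · by_cases hj : j < arr.length
        · rw [drop_getD_cons arr j hj, skipPast9]
          simp only [ne_eq, not_not] at h
          rw [if_pos h]
        · rw [List.drop_eq_nil_of_le (by omega), List.drop_eq_nil_of_le (by omega)]
          simp [skipPast9]

theorem bOuterAux_spec (arr : List Int) :
    ∀ (k i : Nat) (total : Int), arr.length - i ≤ k →
      bOuterAux arr k i total = total + altGo (List.drop i arr) := by
  intro k
  induction k with
  | zero =>
    intro i total hk
    rw [List.drop_eq_nil_of_le (by omega)]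
    simp [bOuterAux, altGo]
  | succ k ih =>
    intro i total hk
    simp only [bOuterAux]
    split
    · rename_i h
      split
      · rename_i h6
        have hge : i + 1 ≤ bInner arr (i + 1) := bInnerAux_ge arr _ _
        rw [ih (bInner arr (i + 1) + 1) total (by omega),
          bInner, bInnerAux_drop arr _ (i + 1) (le_refl _),
          drop_getD_cons arr i h, altGo, if_pos h6]
      · rename_i h6
        rw [ih (i + 1) (total + arr.getD i 0) (by omega),
          drop_getD_cons arr i h, altGo, if_neg h6]
        ring
    · rename_i h
      rw [List.drop_eq_nil_of_le (by omega)]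
      simp [altGo]

def stepA (st : Int × Bool) (a : Int) : Int × Bool :=
  let flag1 : Bool := if a = 6 then false else st.2
  let r1 : Int := if flag1 = true then st.1 + a else st.1
  let flag2 : Bool := if flag1 = false ∧ a = 9 then true else flag1
  (r1, flag2)

theorem foldl_stepA (xs : List Int) : ∀ (r : Int),
    (List.foldl stepA (r, true) xs).1 = r + altGo xs ∧
    (List.foldl stepA (r, false) xs).1 = r + altGo (skipPast9 xs) := by
  induction xs with
  | nil => intro r; simp [altGo, skipPast9]
  | cons a xs ih =>
    intro r
    constructor
    · by_cases h6 : a = 6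
      · subst h6
        simp only [List.foldl_cons, stepA]
        norm_num
        rw [altGo, if_pos rfl]
        exact (ih r).2
      · simp only [List.foldl_cons, stepA]
        norm_num [h6]
        rw [altGo, if_neg h6, (ih (r + a)).1]
        ring
    · by_cases h9 : a = 9
      · subst h9
        simp only [List.foldl_cons, stepA]
        norm_num
        rw [skipPast9, if_pos rfl]
        exact (ih r).1
      · simp only [List.foldl_cons, stepA]
        norm_num [h9]
        rw [skipPast9, if_neg h9]
        by_cases h6 : a = 6 <;> simp [(ih r).2]

-- ===== VERDICT (by name: the statement is the Claim_ definition above) =====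
theorem summer_69_spec : Claim_equal_summer_69 := by
  intro arr _
  unfold Spec_summer_69 summer_69_alt
  have h1 : summer_69 arr = (List.foldl stepA ((0 : Int), true) arr).1 := rfl
  rw [h1, (foldl_stepA arr 0).1, bOuterAux_spec arr arr.length 0 0 (by omega), List.drop_zero]
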